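-- pv_equiv track=rewrite | github.com/ttzytt/PyAutoGrade | tests/Block 4/tested_code/old/9/Unit 1/Card functions/card_functions_reviewed.py | uno_who_played_what
-- ===== SOURCE A (Python) =====
-- def uno_who_played_what(card):
--
--
--
--
--
--     hands = ([],[],[],[])
--     judge = 1
--     count = 0
--     list = 0
--
--
--     while count < len(card):
--
--         hands[list].append(card[count])
--
--
--         if card[count] == 'reverse':
--             judge += 1
--         elif card[count] != 'reverse':
--             judge *= 1
--
--
--         if judge % 2 == 1:
--             if card[count] != 'skip':
--
--                 if list >= 3:
--                     list -= 3
--                 elif list <= 2: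
--                     list += 1
--             elif card[count] == 'skip':
--                 if list >= 2:
--                     list -= 2
--                 elif list <= 1:
--                     list += 2
--             count += 1
--
--         elif judge % 2 == 0:
--             if card[count] != 'skip':
--                 if list <= 0:
--                     list += 3
--                 elif list >= 1:
--                     list -= 1
--             elif card[count] == 'skip':
--                 if list <= 1:
--                     list += 2
--                 elif list >= 2:
--                     list -= 2
--             count += 1
--
--     return hands
-- ===== SOURCE B (Python) =====
-- def uno_who_played_what(card):
--     hands = ([], [], [], [])
--     order = [0, 1, 2, 3]  # turn-order queue: front is the current player
--     for c in card:
--         hands[order[0]].append(c)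
--         if c == 'reverse':
--             order.reverse()
--             order.insert(0, order.pop())  # reverse direction, keep current player at front
--         step = 2 if c == 'skip' else 1
--         order = order[step:] + order[:step]
--     return hands
-- ===== Notes on version B (the rewrite author's own statement) =====
-- stated objective: idiomatic
-- what changed: Replaces A's judge parity counter and four-way branchy +-1/+-2 index arithmetic with an explicit rotating turn-order queue of the four player indices: the front of the queue is the current player, 'reverse' reverses the queue keeping the current player at front, and each card rotates it by 1 (or 2 for 'skip').
import Mathlib
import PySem

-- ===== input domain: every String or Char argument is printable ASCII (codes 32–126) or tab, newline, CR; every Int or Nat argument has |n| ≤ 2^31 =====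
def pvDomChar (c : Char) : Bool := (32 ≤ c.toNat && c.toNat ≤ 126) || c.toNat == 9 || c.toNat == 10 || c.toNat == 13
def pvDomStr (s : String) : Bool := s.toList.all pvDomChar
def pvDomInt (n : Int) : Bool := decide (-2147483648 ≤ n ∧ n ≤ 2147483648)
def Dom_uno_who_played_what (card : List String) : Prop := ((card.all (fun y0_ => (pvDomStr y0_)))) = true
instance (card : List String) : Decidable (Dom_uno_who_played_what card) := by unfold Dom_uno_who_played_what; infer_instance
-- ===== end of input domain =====

-- B keeps the hands as a fixed 4-tuple and models the turn order as an explicit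
-- rotating queue of player indices instead of A's branchy ±1/±2 index arithmetic
-- (objective: simpler/more idiomatic; return value only — hands quadruple).

-- ===== PORT A =====
-- hands[i].append(s) on the 4-tuple of hands (i is always 0..3 in both programs)
def pvAppendAt (h : List String × List String × List String × List String)
    (i : Int) (s : String) : List String × List String × List String × List String :=
  if i = 0 then (h.1 ++ [s], h.2.1, h.2.2.1, h.2.2.2)
  else if i = 1 then (h.1, h.2.1 ++ [s], h.2.2.1, h.2.2.2)
  else if i = 2 then (h.1, h.2.1, h.2.2.1 ++ [s], h.2.2.2)
  else (h.1, h.2.1, h.2.2.1, h.2.2.2 ++ [s])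

-- one iteration of A's while loop, state = (hands, judge, list)
def pvAStep (st : (List String × List String × List String × List String) × Int × Int)
    (c : String) : (List String × List String × List String × List String) × Int × Int :=
  let hands := pvAppendAt st.1 st.2.2 c
  let judge := if c == "reverse" then st.2.1 + 1 else st.2.1 * 1
  let l := st.2.2
  let l' :=
    if PySem.Int.mod judge 2 = 1 then
      (if c != "skip" then (if l ≥ 3 then l - 3 else if l ≤ 2 then l + 1 else l)
       else (if l ≥ 2 then l - 2 else if l ≤ 1 then l + 2 else l))
    else if PySem.Int.mod judge 2 = 0 then
      (if c != "skip" then (if l ≤ 0 then l + 3 else if l ≥ 1 then l - 1 else l)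
       else (if l ≤ 1 then l + 2 else if l ≥ 2 then l - 2 else l))
    else l
  (hands, judge, l')

-- the while loop 'count < len(card)' with 'count += 1' each pass visits card's
-- elements in order: it is the fold of pvAStep over card
def uno_who_played_what (card : List String) : List String × List String × List String × List String :=
  (card.foldl pvAStep (([], [], [], []), 1, 0)).1

-- ===== PORT B =====
-- one iteration of B's for loop, state = (hands, order); order always has the 4
-- player indices, so order[0] (headD 0) never hits Python's IndexError
def pvBStep (st : (List String × List String × List String × List String) × List Int)
    (c : String) : (List String × List String × List String × List String) × List Int :=
  let hands := pvAppendAt st.1 (st.2.headD 0) c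
  let order :=
    if c == "reverse" then
      let r := st.2.reverse          -- order.reverse()
      r.getLast?.toList ++ r.dropLast  -- order.insert(0, order.pop())
    else st.2
  let step : Nat := if c == "skip" then 2 else 1
  (hands, order.drop step ++ order.take step)  -- order = order[step:] + order[:step]

def uno_who_played_what_alt (card : List String) : List String × List String × List String × List String :=
  (card.foldl pvBStep (([], [], [], []), [0, 1, 2, 3])).1

-- ===== PRECONDITION & SPEC =====
def Spec_uno_who_played_what (card : List String) (out : List String × List String × List String × List String) : Prop := out = uno_who_played_what_alt card
instance (card : List String) (out : List String × List String × List String × List String) : Decidable (Spec_uno_who_played_what card out) := by unfold Spec_uno_who_played_what; infer_instance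

-- ===== CLAIM (what is proved, stated in full; the proofs are below) =====
def Claim_equal_uno_who_played_what : Prop := ∀ (card : List String), Dom_uno_who_played_what card → Spec_uno_who_played_what card (uno_who_played_what card)

-- ===== LEMMAS AND PROOFS =====

-- coupling invariant: A's (judge, list) and B's order queue describe the same
-- current player and direction of play
def pvRel (judge l : Int) (order : List Int) : Prop :=
  1 ≤ judge ∧
  ((PySem.Int.mod judge 2 = 1 ∧
      ((l = 0 ∧ order = [0, 1, 2, 3]) ∨ (l = 1 ∧ order = [1, 2, 3, 0]) ∨
       (l = 2 ∧ order = [2, 3, 0, 1]) ∨ (l = 3 ∧ order = [3, 0, 1, 2]))) ∨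
   (PySem.Int.mod judge 2 = 0 ∧
      ((l = 0 ∧ order = [0, 3, 2, 1]) ∨ (l = 1 ∧ order = [1, 0, 3, 2]) ∨
       (l = 2 ∧ order = [2, 1, 0, 3]) ∨ (l = 3 ∧ order = [3, 2, 1, 0]))))

theorem pvMod2 (a : Int) : PySem.Int.mod a 2 = a % 2 :=
  PySem.Int.mod_eq_emod_of_pos (by omega)

theorem pvStep_rel (h : List String × List String × List String × List String)
    (judge l : Int) (order : List Int) (c : String) (hr : pvRel judge l order) :
    (pvAStep (h, judge, l) c).1 = (pvBStep (h, order) c).1 ∧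
    pvRel (pvAStep (h, judge, l) c).2.1 (pvAStep (h, judge, l) c).2.2
      (pvBStep (h, order) c).2 := by
  obtain ⟨hj, hcase⟩ := hr
  have hrs : ∀ s : String, s == "reverse" → (s == "skip") = false := by
    intro s hs; have : s = "reverse" := by simpa using hs
    simp [this]
  rcases hcase with ⟨hp, hc⟩ | ⟨hp, hc⟩ <;> rw [pvMod2] at hp
  · have h2 : (judge + 1) % 2 = 0 := by omega
    by_cases hrev : c == "reverse"
    · have hskip := hrs c hrev
      rcases hc with ⟨hl, ho⟩ | ⟨hl, ho⟩ | ⟨hl, ho⟩ | ⟨hl, ho⟩ <;>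
        simp_all [pvAStep, pvBStep, pvRel, pvMod2] <;> omega
    · have hrev' : (c == "reverse") = false := by simpa using hrev
      by_cases hskip : c == "skip" <;>
        rcases hc with ⟨hl, ho⟩ | ⟨hl, ho⟩ | ⟨hl, ho⟩ | ⟨hl, ho⟩ <;>
          simp_all [pvAStep, pvBStep, pvRel, pvMod2] <;> omega
  · have h2 : (judge + 1) % 2 = 1 := by omega
    by_cases hrev : c == "reverse"
    · have hskip := hrs c hrev
      rcases hc with ⟨hl, ho⟩ | ⟨hl, ho⟩ | ⟨hl, ho⟩ | ⟨hl, ho⟩ <;>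
        simp_all [pvAStep, pvBStep, pvRel, pvMod2] <;> omega
    · have hrev' : (c == "reverse") = false := by simpa using hrev
      by_cases hskip : c == "skip" <;>
        rcases hc with ⟨hl, ho⟩ | ⟨hl, ho⟩ | ⟨hl, ho⟩ | ⟨hl, ho⟩ <;>
          simp_all [pvAStep, pvBStep, pvRel, pvMod2] <;> omega

theorem pvFold_rel (card : List String)
    (h : List String × List String × List String × List String)
    (judge l : Int) (order : List Int) (hr : pvRel judge l order) :
    (card.foldl pvAStep (h, judge, l)).1 = (card.foldl pvBStep (h, order)).1 := by
  induction card generalizing h judge l order with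
  | nil => rfl
  | cons c cs ih =>
    have hs := pvStep_rel h judge l order c hr
    simp only [List.foldl_cons]
    have e1 : pvAStep (h, judge, l) c =
        ((pvAStep (h, judge, l) c).1, (pvAStep (h, judge, l) c).2.1,
         (pvAStep (h, judge, l) c).2.2) := rfl
    rw [e1, hs.1]
    exact ih _ _ _ _ hs.2

-- ===== VERDICT (by name: the statement is the Claim_ definition above) =====
theorem uno_who_played_what_spec : Claim_equal_uno_who_played_what := by
  intro card _
  show _ = _
  exact pvFold_rel card ([], [], [], []) 1 0 [0, 1, 2, 3] ⟨le_refl 1, Or.inl ⟨by decide, Or.inl ⟨rfl, rfl⟩⟩⟩
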